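-- pv_equiv track=rewrite | github.com/wdpm/programming-wiki-incubator | programming-language/python/ClassicComputerScienceProblemsInPython/Chapter8/connectfour.py | generate_segments
-- ===== SOURCE A (Python) =====
-- from typing import List, Optional, Tuple
--
-- def generate_segments(num_columns: int, num_rows: int, segment_length: int) -> List[List[Tuple[int, int]]]:
--     """
--     每个子列表包含4个网格方位。这4个网格方位组成的列表被称为一个区段.
--     Tuple[int, int] 表示的是(列，行)，而不是(行，列)。注意顺序。
--     :param num_columns:
--     :param num_rows:
--     :param segment_length:
--     :return:
--     """
--     segments: List[List[Tuple[int, int]]] = []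
--     # generate the vertical segments
--     # column: [0...col-1] => 特定列
--     for c in range(num_columns):
--         # row: [0,rows-seg+1) 注意右括号是不包含 => 特定列的垂直移动。
--         for r in range(num_rows - segment_length + 1):
--             segment: List[Tuple[int, int]] = []
--             for t in range(segment_length):
--                 segment.append((c, r + t))
--             segments.append(segment)
--
--     # generate the horizontal segments
--     for c in range(num_columns - segment_length + 1):
--         for r in range(num_rows):
--             segment = []
--             for t in range(segment_length):
--                 segment.append((c + t, r))
--             segments.append(segment)
--
--     # generate the top left to bottom right diagonal segments
--     for c in range(num_columns - segment_length + 1):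
--         for r in range(num_rows - segment_length + 1):
--             segment = []
--             for t in range(segment_length):
--                 segment.append((c + t, r + t))
--             segments.append(segment)
--
--     # generate the bottom left to top right diagonal segments
--     for c in range(num_columns - segment_length + 1):
--         for r in range(segment_length - 1, num_rows):
--             segment = []
--             for t in range(segment_length):
--                 segment.append((c + t, r - t))
--             segments.append(segment)
--     return segments
-- ===== SOURCE B (Python) =====
-- from typing import List, Tuple
--
-- def generate_segments(num_columns: int, num_rows: int, segment_length: int) -> List[List[Tuple[int, int]]]:
--     # Flat construction: compute the four block sizes up front, then decode each
--     # global index k into (start cell, direction) arithmetically via divmod.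
--     cfit = max(num_columns - segment_length + 1, 0)
--     rfit = max(num_rows - segment_length + 1, 0)
--     V = max(num_columns, 0) * rfit          # vertical segments
--     H = cfit * max(num_rows, 0)             # horizontal segments
--     D = cfit * rfit                         # each diagonal family
--     out: List[List[Tuple[int, int]]] = []
--     for k in range(V + H + 2 * D):
--         if k < V:
--             c, r = divmod(k, rfit)
--             seg = [(c, r + t) for t in range(segment_length)]
--         elif k < V + H:
--             c, r = divmod(k - V, max(num_rows, 0))
--             seg = [(c + t, r) for t in range(segment_length)]
--         elif k < V + H + D:
--             c, r = divmod(k - V - H, rfit)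
--             seg = [(c + t, r + t) for t in range(segment_length)]
--         else:
--             c, r = divmod(k - V - H - D, rfit)
--             r += segment_length - 1
--             seg = [(c + t, r - t) for t in range(segment_length)]
--         out.append(seg)
--     return out
-- ===== Notes on version B (the rewrite author's own statement) =====
-- stated objective: alternative
-- what changed: Replaces A's four nested column/row loop blocks by a single flat loop over one index range of precomputed total length, arithmetically decoding each global index k into its block, start cell and direction via divmod.
import Mathlib
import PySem

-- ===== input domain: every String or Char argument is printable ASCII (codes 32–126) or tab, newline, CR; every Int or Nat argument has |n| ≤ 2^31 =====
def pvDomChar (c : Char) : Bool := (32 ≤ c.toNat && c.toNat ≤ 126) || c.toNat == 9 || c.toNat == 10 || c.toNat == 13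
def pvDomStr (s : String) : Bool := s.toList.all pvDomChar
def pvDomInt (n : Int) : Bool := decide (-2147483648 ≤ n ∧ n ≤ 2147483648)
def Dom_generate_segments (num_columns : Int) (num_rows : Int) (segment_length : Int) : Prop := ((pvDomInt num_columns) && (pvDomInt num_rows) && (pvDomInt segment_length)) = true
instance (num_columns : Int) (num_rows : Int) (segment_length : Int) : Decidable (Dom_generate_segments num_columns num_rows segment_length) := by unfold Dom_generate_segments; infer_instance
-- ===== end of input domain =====

-- B enumerates one flat index range of precomputed total length and decodes each index
-- into (start cell, direction) via divmod, instead of A's four nested loop blocks; same output.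

-- ===== PORT A =====
-- literal transliteration: four blocks, inner segment built by append-in-a-loop
def generate_segments (num_columns : Int) (num_rows : Int) (segment_length : Int) : List (List (Int × Int)) :=
  let segments : List (List (Int × Int)) := []
  -- vertical
  let segments := (PySem.List.pyRange 0 num_columns).foldl (fun segs c =>
    (PySem.List.pyRange 0 (num_rows - segment_length + 1)).foldl (fun segs r =>
      segs ++ [(PySem.List.pyRange 0 segment_length).foldl
        (fun seg t => seg ++ [(c, r + t)]) []]) segs) segments
  -- horizontal
  let segments := (PySem.List.pyRange 0 (num_columns - segment_length + 1)).foldl (fun segs c =>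
    (PySem.List.pyRange 0 num_rows).foldl (fun segs r =>
      segs ++ [(PySem.List.pyRange 0 segment_length).foldl
        (fun seg t => seg ++ [(c + t, r)]) []]) segs) segments
  -- top-left to bottom-right diagonal
  let segments := (PySem.List.pyRange 0 (num_columns - segment_length + 1)).foldl (fun segs c =>
    (PySem.List.pyRange 0 (num_rows - segment_length + 1)).foldl (fun segs r =>
      segs ++ [(PySem.List.pyRange 0 segment_length).foldl
        (fun seg t => seg ++ [(c + t, r + t)]) []]) segs) segments
  -- bottom-left to top-right diagonal
  let segments := (PySem.List.pyRange 0 (num_columns - segment_length + 1)).foldl (fun segs c =>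
    (PySem.List.pyRange (segment_length - 1) num_rows).foldl (fun segs r =>
      segs ++ [(PySem.List.pyRange 0 segment_length).foldl
        (fun seg t => seg ++ [(c + t, r - t)]) []]) segs) segments
  segments

-- ===== PORT B =====
-- literal transliteration of Source B: block sizes up front, one flat loop, divmod decoding
def generate_segments_alt (num_columns : Int) (num_rows : Int) (segment_length : Int) : List (List (Int × Int)) :=
  let cfit := max (num_columns - segment_length + 1) 0
  let rfit := max (num_rows - segment_length + 1) 0
  let V := max num_columns 0 * rfit
  let H := cfit * max num_rows 0
  let D := cfit * rfit
  (PySem.List.pyRange 0 (V + H + 2 * D)).foldl (fun out k =>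
    let seg :=
      if k < V then
        let c := PySem.Int.floordiv k rfit
        let r := PySem.Int.mod k rfit
        (PySem.List.pyRange 0 segment_length).map (fun t => (c, r + t))
      else if k < V + H then
        let c := PySem.Int.floordiv (k - V) (max num_rows 0)
        let r := PySem.Int.mod (k - V) (max num_rows 0)
        (PySem.List.pyRange 0 segment_length).map (fun t => (c + t, r))
      else if k < V + H + D then
        let c := PySem.Int.floordiv (k - V - H) rfit
        let r := PySem.Int.mod (k - V - H) rfit
        (PySem.List.pyRange 0 segment_length).map (fun t => (c + t, r + t))
      else
        let c := PySem.Int.floordiv (k - V - H - D) rfit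
        let r := PySem.Int.mod (k - V - H - D) rfit + (segment_length - 1)
        (PySem.List.pyRange 0 segment_length).map (fun t => (c + t, r - t))
    out ++ [seg]) []

-- ===== PRECONDITION & SPEC =====
def Spec_generate_segments (num_columns : Int) (num_rows : Int) (segment_length : Int) (out : List (List (Int × Int))) : Prop := out = generate_segments_alt num_columns num_rows segment_length
instance (num_columns : Int) (num_rows : Int) (segment_length : Int) (out : List (List (Int × Int))) : Decidable (Spec_generate_segments num_columns num_rows segment_length out) := by unfold Spec_generate_segments; infer_instance

-- ===== CLAIM (what is proved, stated in full; the proofs are below) =====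
def Claim_equal_generate_segments : Prop := ∀ (num_columns : Int) (num_rows : Int) (segment_length : Int), Dom_generate_segments num_columns num_rows segment_length → Spec_generate_segments num_columns num_rows segment_length (generate_segments num_columns num_rows segment_length)

-- ===== LEMMAS AND PROOFS =====

-- a shifted range mapped is the zero-based range mapped through the shift
theorem pv_map_pyRange_shift {α : Type} (a sz : Int) (g : Int → α) :
    (PySem.List.pyRange a (a + sz)).map g
      = (PySem.List.pyRange 0 sz).map (fun j => g (a + j)) := by
  rw [PySem.List.pyRange_one a, PySem.List.pyRange_one 0]
  simp [List.map_map, Function.comp_def, add_sub_cancel_left]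

theorem pv_pyRange_max (x : Int) :
    PySem.List.pyRange 0 (max x 0) = PySem.List.pyRange 0 x := by
  rw [PySem.List.pyRange_one, PySem.List.pyRange_one]
  congr 2
  omega

-- divmod decoding of a flat index range is the nested enumeration
theorem pv_divmod_flatten_nat {α : Type} (n : Nat) (R : Int) (hR : 0 < R)
    (f : Int → Int → α) :
    (PySem.List.pyRange 0 ((n : Int) * R)).map
        (fun k => f (PySem.Int.floordiv k R) (PySem.Int.mod k R))
      = (PySem.List.pyRange 0 (n : Int)).flatMap
          (fun c => (PySem.List.pyRange 0 R).map (fun r => f c r)) := by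
  induction n with
  | zero => simp [PySem.List.pyRange_one]
  | succ n ih =>
    push_cast
    have h1 : (0:Int) ≤ (n:Int) * R := by positivity
    have h2 : (n:Int) * R ≤ ((n:Int) + 1) * R := by nlinarith
    rw [PySem.List.pyRange_one_append 0 ((n:Int) * R) (((n:Int) + 1) * R) h1 h2,
      List.map_append]
    rw [show ((n:Int) + 1) * R = (n:Int) * R + R by ring, pv_map_pyRange_shift]
    rw [PySem.List.pyRange_one_succ_right (by positivity : (0:Int) ≤ (n:Int)),
      List.flatMap_append]
    push_cast at ih
    rw [ih]
    congr 1
    simp only [List.flatMap_cons, List.flatMap_nil, List.append_nil]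
    apply List.map_congr_left
    intro j hj
    rw [PySem.List.mem_pyRange_one] at hj
    have hd : PySem.Int.floordiv ((n:Int) * R + j) R = (n:Int) :=
      (PySem.Int.floordiv_eq_iff_of_pos hR).mpr ⟨by nlinarith, by nlinarith⟩
    have hm : PySem.Int.mod ((n:Int) * R + j) R = j := by
      have h := PySem.Int.floordiv_mul_add_mod ((n:Int) * R + j) R
      rw [hd] at h; linarith
    rw [hd, hm]

theorem pv_divmod_flatten {α : Type} (C R : Int) (hC : 0 ≤ C) (hR : 0 ≤ R)
    (f : Int → Int → α) :
    (PySem.List.pyRange 0 (C * R)).map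
        (fun k => f (PySem.Int.floordiv k R) (PySem.Int.mod k R))
      = (PySem.List.pyRange 0 C).flatMap
          (fun c => (PySem.List.pyRange 0 R).map (fun r => f c r)) := by
  rcases eq_or_lt_of_le hR with h0 | hpos
  · simp [← h0, PySem.List.pyRange_one]
  · obtain ⟨n, rfl⟩ := Int.eq_ofNat_of_zero_le hC
    exact pv_divmod_flatten_nat n R hpos f

theorem generate_segments_eq (nc nr L : Int) :
    generate_segments nc nr L = generate_segments_alt nc nr L := by
  have hrf : (0:Int) ≤ max (nr - L + 1) 0 := le_max_right _ _
  have hcf : (0:Int) ≤ max (nc - L + 1) 0 := le_max_right _ _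
  have hr0 : (0:Int) ≤ max nr 0 := le_max_right _ _
  have hc0 : (0:Int) ≤ max nc 0 := le_max_right _ _
  unfold generate_segments generate_segments_alt
  simp only [PySem.List.foldl_append_singleton_eq_map, PySem.List.foldl_append_eq_flatMap, List.nil_append]
  set rfit := max (nr - L + 1) 0 with hrfit
  set cfit := max (nc - L + 1) 0 with hcfit
  set RowsM := max nr 0 with hRowsM
  set ColsM := max nc 0 with hColsM
  set V := ColsM * rfit with hV
  set H := cfit * RowsM with hH
  set D := cfit * rfit with hD
  have hV0 : (0:Int) ≤ V := mul_nonneg hc0 hrf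
  have hH0 : (0:Int) ≤ H := mul_nonneg hcf hr0
  have hD0 : (0:Int) ≤ D := mul_nonneg hcf hrf
  rw [PySem.List.pyRange_one_append 0 V (V + H + 2*D) hV0 (by linarith), List.map_append,
      PySem.List.pyRange_one_append V (V + H) (V + H + 2*D) (by linarith) (by linarith), List.map_append,
      PySem.List.pyRange_one_append (V + H) (V + H + D) (V + H + 2*D) (by linarith) (by linarith), List.map_append]
  simp only [List.append_assoc]
  congr 1
  · -- vertical block
    symm
    trans ((PySem.List.pyRange 0 V).map (fun k =>
      (PySem.List.pyRange 0 L).map (fun t => (PySem.Int.floordiv k rfit, PySem.Int.mod k rfit + t))))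
    · apply List.map_congr_left
      intro k hk
      rw [PySem.List.mem_pyRange_one] at hk
      rw [if_pos hk.2]
    · rw [hV]
      have e := pv_divmod_flatten ColsM rfit hc0 hrf
        (fun c r => (PySem.List.pyRange 0 L).map (fun t => (c, r + t)))
      simp only [] at e
      rw [e, hColsM, hrfit, pv_pyRange_max, pv_pyRange_max]
  congr 1
  · -- horizontal block
    symm
    rw [pv_map_pyRange_shift V H]
    trans ((PySem.List.pyRange 0 H).map (fun j =>
      (PySem.List.pyRange 0 L).map (fun t => (PySem.Int.floordiv j RowsM + t, PySem.Int.mod j RowsM))))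
    · apply List.map_congr_left
      intro j hj
      rw [PySem.List.mem_pyRange_one] at hj
      rw [if_neg (by linarith), if_pos (by linarith), show V + j - V = j by ring]
    · rw [hH]
      have e := pv_divmod_flatten cfit RowsM hcf hr0
        (fun c r => (PySem.List.pyRange 0 L).map (fun t => (c + t, r)))
      simp only [] at e
      rw [e, hcfit, hRowsM, pv_pyRange_max, pv_pyRange_max]
  congr 1
  · -- down-right diagonal block
    symm
    rw [pv_map_pyRange_shift (V + H) D]
    trans ((PySem.List.pyRange 0 D).map (fun j =>
      (PySem.List.pyRange 0 L).map (fun t => (PySem.Int.floordiv j rfit + t, PySem.Int.mod j rfit + t))))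
    · apply List.map_congr_left
      intro j hj
      rw [PySem.List.mem_pyRange_one] at hj
      rw [if_neg (by linarith), if_neg (by linarith), if_pos (by linarith),
        show V + H + j - V - H = j by ring]
    · rw [hD]
      have e := pv_divmod_flatten cfit rfit hcf hrf
        (fun c r => (PySem.List.pyRange 0 L).map (fun t => (c + t, r + t)))
      simp only [] at e
      rw [e, hcfit, hrfit, pv_pyRange_max, pv_pyRange_max]
  · -- up-right diagonal block
    symm
    rw [show V + H + 2*D = V + H + D + D by ring, pv_map_pyRange_shift (V + H + D) D]
    trans ((PySem.List.pyRange 0 D).map (fun j =>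
      (PySem.List.pyRange 0 L).map (fun t =>
        (PySem.Int.floordiv j rfit + t, PySem.Int.mod j rfit + (L - 1) - t))))
    · apply List.map_congr_left
      intro j hj
      rw [PySem.List.mem_pyRange_one] at hj
      rw [if_neg (by linarith), if_neg (by linarith), if_neg (by linarith),
        show V + H + D + j - V - H - D = j by ring]
    · rw [hD]
      have e := pv_divmod_flatten cfit rfit hcf hrf
        (fun c r => (PySem.List.pyRange 0 L).map (fun t => (c + t, r + (L - 1) - t)))
      simp only [] at e
      rw [e, hcfit, hrfit, pv_pyRange_max, pv_pyRange_max]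
      have hr4 : PySem.List.pyRange (L - 1) nr
          = (PySem.List.pyRange 0 (nr - L + 1)).map (fun j => (L - 1) + j) := by
        rw [PySem.List.pyRange_one (L - 1) nr, PySem.List.pyRange_one 0 (nr - L + 1), List.map_map]
        congr 1
        · funext k
          simp
        · congr 1
          omega
      rw [hr4]
      simp only [List.map_map, Function.comp_def]
      congr 1
      funext c
      congr 1
      funext j
      congr 1
      funext t
      simp only [Prod.mk.injEq]
      exact ⟨trivial, by ring⟩


-- ===== VERDICT (by name: the statement is the Claim_ definition above) =====
theorem generate_segments_spec : Claim_equal_generate_segments := by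
  intro nc nr sl _
  unfold Spec_generate_segments
  exact generate_segments_eq nc nr sl
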